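-- pv_equiv track=rewrite | github.com/ontio-test/test | test_tool/utils/common.py | bl_reserver
-- ===== SOURCE A (Python) =====
-- def bl_reserver(input):
-- 	if input == None:
-- 		return ""
-- 	if len(input) % 2 != 0:
-- 		return input
--
-- 	rstrs = input[::-1]
-- 	output = ""
-- 	for i in range(0, len(input), 2):
-- 		output = output + rstrs[i + 1]
-- 		output = output + rstrs[i]
-- 	return output
-- ===== SOURCE B (Python) =====
-- def bl_reserver(input):
--     if input == None:
--         return ""
--     if len(input) % 2 != 0:
--         return input
--     out = ""
--     it = iter(input)
--     for a, b in zip(it, it):   # consecutive char pairs, one forward pass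
--         out = a + b + out      # prepend each pair
--     return out
-- ===== Notes on version B (the rewrite author's own statement) =====
-- stated objective: simpler
-- what changed: Instead of reversing the whole string and re-swapping adjacent characters by index, B makes a single forward pass over consecutive character pairs and prepends each pair to the accumulator, so no reversal or index arithmetic is needed.
import Mathlib
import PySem

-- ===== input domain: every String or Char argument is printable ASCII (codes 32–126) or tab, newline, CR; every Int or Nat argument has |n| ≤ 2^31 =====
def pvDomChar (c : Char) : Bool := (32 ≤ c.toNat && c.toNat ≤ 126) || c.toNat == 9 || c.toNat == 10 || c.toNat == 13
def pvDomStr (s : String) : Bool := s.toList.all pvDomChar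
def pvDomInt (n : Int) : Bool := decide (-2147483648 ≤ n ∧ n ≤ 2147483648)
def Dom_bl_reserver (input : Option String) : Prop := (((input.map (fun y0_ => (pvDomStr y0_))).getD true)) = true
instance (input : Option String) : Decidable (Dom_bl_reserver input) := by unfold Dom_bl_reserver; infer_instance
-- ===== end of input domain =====

-- B replaces A's reverse-then-swap index loop by a single forward pass over consecutive char pairs that prepends each pair to the accumulator (objective: simpler).

-- ===== PORT A =====
def bl_reserver (input : Option String) : String :=
  match input with
  | none => ""                                     -- if input == None: return ""
  | some s =>
    let cs := s.toList
    if cs.length % 2 ≠ 0 then s                    -- if len(input) % 2 != 0: return input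
    else
      let rstrs := cs.reverse                      -- input[::-1]
      -- indices i, i+1 are always in range when the length is even, so the pyGetD default is never read
      let out := (PySem.List.pyRange 0 (cs.length : Int) 2).foldl
        (fun output i =>
          (output ++ [PySem.List.pyGetD rstrs (i + 1) ' ']) ++ [PySem.List.pyGetD rstrs i ' ']) []
      String.ofList out

-- ===== PORT B =====
-- B's loop: consume the char list two at a time, prepending each pair to the accumulator
def blPairsPrepend : List Char → List Char → List Char
  | a :: b :: t, out => blPairsPrepend t (a :: b :: out)   -- out = a + b + out
  | _, out => out                                           -- zip(it, it) stops before a lone leftover char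

def bl_reserver_alt (input : Option String) : String :=
  match input with
  | none => ""
  | some s =>
    if s.toList.length % 2 ≠ 0 then s
    else String.ofList (blPairsPrepend s.toList [])

-- ===== PRECONDITION & SPEC =====
def Spec_bl_reserver (input : Option String) (out : String) : Prop := out = bl_reserver_alt input
instance (input : Option String) (out : String) : Decidable (Spec_bl_reserver input out) := by unfold Spec_bl_reserver; infer_instance

-- ===== CLAIM (what is proved, stated in full; the proofs are below) =====
def Claim_equal_bl_reserver : Prop := ∀ (input : Option String), Dom_bl_reserver input → Spec_bl_reserver input (bl_reserver input)

-- ===== LEMMAS AND PROOFS =====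


-- the common value of both loops on an even-length list: pairs in reverse order, each pair kept in order
def pairRev : List Char → List Char
  | [] => []
  | [x] => [x]
  | a :: b :: t => pairRev t ++ [a, b]

theorem a_loop (m : Nat) : ∀ (cs : List Char) (acc : List Char), cs.length = 2 * m →
    ((List.range m).map (fun k => ((2 * k : Nat) : Int))).foldl
      (fun output i =>
        (output ++ [PySem.List.pyGetD cs.reverse (i + 1) ' ']) ++ [PySem.List.pyGetD cs.reverse i ' ']) acc
      = acc ++ pairRev cs := by
  induction m with
  | zero =>
    intro cs acc h
    have : cs = [] := List.eq_nil_of_length_eq_zero (by omega)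
    subst this; simp [pairRev]
  | succ m ih =>
    intro cs acc h
    match cs, h with
    | a :: b :: t, h =>
      have ht : t.length = 2 * m := by simp at h; omega
      have hrev : (a :: b :: t).reverse = t.reverse ++ [b, a] := by simp
      have hlr : t.reverse.length = 2 * m := by simp [ht]
      rw [List.range_succ, List.map_append, List.foldl_append]
      have hcongr :
          ((List.range m).map (fun k => ((2 * k : Nat) : Int))).foldl
            (fun output i =>
              (output ++ [PySem.List.pyGetD (a :: b :: t).reverse (i + 1) ' ']) ++
                [PySem.List.pyGetD (a :: b :: t).reverse i ' ']) acc
          = ((List.range m).map (fun k => ((2 * k : Nat) : Int))).foldl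
            (fun output i =>
              (output ++ [PySem.List.pyGetD t.reverse (i + 1) ' ']) ++
                [PySem.List.pyGetD t.reverse i ' ']) acc := by
        apply PySem.List.foldl_congr_mem
        intro o x hx
        rcases List.mem_map.mp hx with ⟨k, hk, rfl⟩
        have hk' : k < m := List.mem_range.mp hk
        have e1 : ((2 * k : Nat) : Int) + 1 = ((2 * k + 1 : Nat) : Int) := by push_cast; ring
        rw [hrev, e1, PySem.List.pyGetD_natCast, PySem.List.pyGetD_natCast,
            PySem.List.pyGetD_natCast, PySem.List.pyGetD_natCast,
            List.getD_append _ _ _ _ (by omega), List.getD_append _ _ _ _ (by omega)]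
      rw [hcongr, ih t acc ht]
      have e1 : ((2 * m : Nat) : Int) + 1 = ((2 * m + 1 : Nat) : Int) := by push_cast; ring
      have hga : PySem.List.pyGetD (a :: b :: t).reverse (((2 * m : Nat) : Int) + 1) ' ' = a := by
        rw [hrev, e1, PySem.List.pyGetD_natCast]
        have : (t.reverse ++ [b, a]).getD (2 * m + 1) ' ' = ([b,a]).getD 1 ' ' := by
          simp [List.getD, hlr]
        simpa using this
      have hgb : PySem.List.pyGetD (a :: b :: t).reverse ((2 * m : Nat) : Int) ' ' = b := by
        rw [hrev, PySem.List.pyGetD_natCast]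
        have : (t.reverse ++ [b, a]).getD (2 * m) ' ' = ([b,a]).getD 0 ' ' := by
          simp [List.getD, hlr]
        simpa using this
      simp only [List.map_cons, List.map_nil, List.foldl_cons, List.foldl_nil, hga, hgb]
      simp [pairRev]

theorem rng_two (m : Nat) :
    PySem.List.pyRange 0 (2 * (m : Int)) 2 = (List.range m).map (fun k => ((2 * k : Nat) : Int)) := by
  rw [PySem.List.pyRange_of_pos 0 (2 * (m : Int)) (by norm_num)]
  rcases Nat.eq_zero_or_pos m with hm | hm
  · subst hm; simp
  · have h1 : (0 : Int) < 2 * (m : Int) := by positivity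
    rw [if_pos h1]
    have h2 : ((2 * (m : Int) - 0 + 2 - 1) / 2).toNat = m := by omega
    rw [h2]
    apply List.map_congr_left
    intro k _
    push_cast
    ring

theorem b_loop : ∀ (cs out : List Char), cs.length % 2 = 0 →
    blPairsPrepend cs out = pairRev cs ++ out := by
  intro cs
  induction cs using pairRev.induct with
  | case1 => intro out h; simp [blPairsPrepend, pairRev]
  | case2 x => intro out h; simp at h
  | case3 a b t ih =>
    intro out h
    have ht : t.length % 2 = 0 := by simp at h; omega
    simp [blPairsPrepend, pairRev, ih (a :: b :: out) ht]

-- ===== VERDICT (by name: the statement is the Claim_ definition above) =====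
theorem bl_reserver_spec : Claim_equal_bl_reserver := by
  intro input _
  unfold Spec_bl_reserver bl_reserver bl_reserver_alt
  match input with
  | none => rfl
  | some s =>
    simp only
    by_cases hodd : s.toList.length % 2 ≠ 0
    · rw [if_pos hodd, if_pos hodd]
    · rw [if_neg hodd, if_neg hodd]
      simp only [ne_eq, not_not] at hodd
      obtain ⟨m, hm⟩ : ∃ m, s.toList.length = 2 * m := ⟨s.toList.length / 2, by omega⟩
      have hcast : ((s.toList.length : Int)) = 2 * (m : Int) := by rw [hm]; push_cast; ring
      rw [hcast, rng_two m, a_loop m s.toList [] hm, b_loop s.toList [] hodd]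
      simp
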